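-- pv_equiv track=rewrite | github.com/andyliszewski/grounding-ai | grounding/pipeline.py | _did_use_fallback
-- ===== SOURCE A (Python) =====
-- def _did_use_fallback(markdown: str) -> bool:
--     """Detect whether fallback front matter is present in the Markdown output."""
--     if not markdown.startswith("---"):
--         return False
--     for line in markdown.splitlines()[1:]:
--         stripped = line.strip()
--         if stripped == "---":
--             break
--         if stripped.lower().startswith("fallback:"):
--             _, _, value = stripped.partition(":")
--             return value.strip().lower() == "true"
--     return False
-- ===== SOURCE B (Python) =====
-- def _did_use_fallback(markdown: str) -> bool:
--     """Front-matter table build + single lookup instead of an early-exit scan."""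
--     if not markdown.startswith("---"):
--         return False
--     table = {}
--     for line in markdown.splitlines()[1:]:
--         stripped = line.strip()
--         if stripped == "---":
--             break
--         pre, sep, post = stripped.partition(":")
--         key = pre.lower()
--         if sep and key not in table:
--             table[key] = post
--     return table.get("fallback", "").strip().lower() == "true"
-- ===== Notes on version B (the rewrite author's own statement) =====
-- stated objective: alternative
-- what changed: Replaces A's early-exit scan (test each stripped line for a lowercased 'fallback:' prefix and return immediately) with a declarative build of the whole front-matter block as a first-occurrence-wins dict keyed on the lowercased pre-colon text, followed by a single table.get('fallback') lookup.
import Mathlib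
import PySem

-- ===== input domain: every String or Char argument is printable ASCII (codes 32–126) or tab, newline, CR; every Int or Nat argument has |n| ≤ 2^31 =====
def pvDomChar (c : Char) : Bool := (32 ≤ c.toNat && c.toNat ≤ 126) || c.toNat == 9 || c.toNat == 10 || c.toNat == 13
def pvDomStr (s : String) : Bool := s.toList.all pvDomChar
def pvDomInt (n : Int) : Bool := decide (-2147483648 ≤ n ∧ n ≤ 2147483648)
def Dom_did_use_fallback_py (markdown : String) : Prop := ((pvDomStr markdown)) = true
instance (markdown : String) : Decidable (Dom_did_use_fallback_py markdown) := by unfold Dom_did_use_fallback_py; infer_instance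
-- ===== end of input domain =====

-- B replaces A's early-exit scan by building a first-wins front-matter table once and doing a single lookup (objective: alternative/idiomatic, same cost).

-- shared helper: s.partition(":") — exact: splits at the FIRST ':' of s, or returns (s, "", "")
def pvSplitAtColon : List Char → Option (List Char × List Char)
  | [] => none
  | c :: cs =>
    if c = ':' then some ([], cs)
    else match pvSplitAtColon cs with
      | some (p, q) => some (c :: p, q)
      | none => none

def pvPartitionColon (s : String) : String × String × String :=
  match pvSplitAtColon s.toList with
  | some (p, q) => (String.ofList p, ":", String.ofList q)
  | none => (s, "", "")

-- ===== PORT A =====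
def pvLoopA : List String → Bool
  | [] => false
  | l :: rest =>
    let stripped := PySem.Str.strip l
    if stripped == "---" then false
    else if PySem.Str.startswith (PySem.Str.lower stripped) "fallback:" then
      PySem.Str.lower (PySem.Str.strip (pvPartitionColon stripped).2.2) == "true"
    else pvLoopA rest

def did_use_fallback_py (markdown : String) : Bool :=
  if !(PySem.Str.startswith markdown "---") then false
  else pvLoopA ((PySem.Str.splitlines markdown).drop 1)

-- ===== PORT B =====
def pvLoopB (t : PySem.Dict String String) : List String → PySem.Dict String String
  | [] => t
  | l :: rest =>
    let stripped := PySem.Str.strip l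
    if stripped == "---" then t
    else
      let part := pvPartitionColon stripped
      let key := PySem.Str.lower part.1
      let t' := if part.2.1 ≠ "" ∧ ¬ (t.contains key = true) then t.insert key part.2.2 else t
      pvLoopB t' rest

def did_use_fallback_py_alt (markdown : String) : Bool :=
  if !(PySem.Str.startswith markdown "---") then false
  else
    let t := pvLoopB PySem.Dict.empty ((PySem.Str.splitlines markdown).drop 1)
    PySem.Str.lower (PySem.Str.strip (t.getD "fallback" "")) == "true"

-- ===== PRECONDITION & SPEC =====
def Spec_did_use_fallback_py (markdown : String) (out : Bool) : Prop := out = did_use_fallback_py_alt markdown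
instance (markdown : String) (out : Bool) : Decidable (Spec_did_use_fallback_py markdown out) := by unfold Spec_did_use_fallback_py; infer_instance

-- ===== CLAIM (what is proved, stated in full; the proofs are below) =====
def Claim_equal_did_use_fallback_py : Prop := ∀ (markdown : String), Dom_did_use_fallback_py markdown → Spec_did_use_fallback_py markdown (did_use_fallback_py markdown)

-- ===== LEMMAS AND PROOFS =====

theorem pvSplitAtColon_none {cs : List Char} (h : pvSplitAtColon cs = none) : ':' ∉ cs := by
  induction cs with
  | nil => simp
  | cons c cs ih =>
    simp only [pvSplitAtColon] at h
    by_cases hc : c = ':'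
    · simp [hc] at h
    · cases hsp : pvSplitAtColon cs with
      | none =>
        intro hmem
        rcases List.mem_cons.mp hmem with h1 | h1
        · exact hc h1.symm
        · exact ih hsp h1
      | some pq => simp [hc, hsp] at h

theorem pvSplitAtColon_some {cs p q : List Char} (h : pvSplitAtColon cs = some (p, q)) :
    cs = p ++ ':' :: q ∧ ':' ∉ p := by
  induction cs generalizing p q with
  | nil => simp [pvSplitAtColon] at h
  | cons c cs ih =>
    simp only [pvSplitAtColon] at h
    by_cases hc : c = ':'
    · simp [hc] at h
      obtain ⟨hp, hq⟩ := h
      subst hp; subst hq; simp [hc]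
    · cases hsp : pvSplitAtColon cs with
      | none => simp [hc, hsp] at h
      | some pq =>
        obtain ⟨p', q'⟩ := pq
        simp [hc, hsp] at h
        obtain ⟨hp, hq⟩ := h
        obtain ⟨h1, h2⟩ := ih hsp
        subst hq
        refine ⟨by rw [← hp]; simp [h1], ?_⟩
        rw [← hp]
        intro hmem
        rcases List.mem_cons.mp hmem with h1' | h1'
        · exact hc h1'.symm
        · exact h2 h1'

theorem pvLowerChar_colon (c : Char) : PySem.Chars.lowerChar c = ':' ↔ c = ':' := by
  simp only [PySem.Chars.lowerChar, PySem.Chars.isupper, Bool.and_eq_true, decide_eq_true_eq]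
  split_ifs with h
  · obtain ⟨hA, hZ⟩ := h
    have h65 : 65 ≤ c.toNat := by
      have h' : ('A' : Char).toNat ≤ c.toNat := Char.le_def.mp hA
      have hA' : ('A' : Char).toNat = 65 := by decide
      omega
    have h90 : c.toNat ≤ 90 := by
      have h' : c.toNat ≤ ('Z' : Char).toNat := Char.le_def.mp hZ
      have hZ' : ('Z' : Char).toNat = 90 := by decide
      omega
    constructor
    · intro he
      exfalso
      have hval : (c.toNat + 32).isValidChar := Or.inl (by omega)
      have hthis : (Char.ofNat (c.toNat + 32)).toNat = (':' : Char).toNat := by rw [he]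
      rw [Char.toNat_ofNat, if_pos hval] at hthis
      have hcolon : (':' : Char).toNat = 58 := by decide
      omega
    · intro he
      subst he
      have hcolon : (':' : Char).toNat = 58 := by decide
      omega
  · exact Iff.rfl

theorem pvMem_lower_colon (cs : List Char) : ':' ∈ PySem.Chars.lower cs ↔ ':' ∈ cs := by
  simp only [PySem.Chars.lower, List.mem_map]
  constructor
  · rintro ⟨c, hc, he⟩
    rwa [(pvLowerChar_colon c).mp he] at hc
  · intro h; exact ⟨':', h, (pvLowerChar_colon ':').mpr rfl⟩

theorem pvLower_append (p q : List Char) :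
    PySem.Chars.lower (p ++ ':' :: q) = PySem.Chars.lower p ++ ':' :: PySem.Chars.lower q := by
  have hc : PySem.Chars.lowerChar ':' = ':' := (pvLowerChar_colon ':').mpr rfl
  simp [PySem.Chars.lower, hc]

-- prefix characterisation: with ':' absent from xs and ks,
-- (ks ++ [':']) is a prefix of (xs ++ ':' :: ys) iff xs = ks
theorem pvPrefix_colon {xs ks : List Char} (ys : List Char)
    (hx : ':' ∉ xs) (hk : ':' ∉ ks) :
    ((ks ++ [':']) <+: (xs ++ ':' :: ys)) ↔ xs = ks := by
  induction ks generalizing xs with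
  | nil =>
    cases xs with
    | nil => simp
    | cons x xs =>
      simp only [List.nil_append, List.cons_append]
      constructor
      · intro h
        rw [show ([':'] : List Char) = ':' :: ([] : List Char) from rfl,
          List.cons_prefix_cons] at h
        exact absurd (by rw [← h.1]; exact List.mem_cons_self ..) hx
      · intro h; simp at h
  | cons k ks ih =>
    cases xs with
    | nil =>
      simp only [List.nil_append, List.cons_append]
      constructor
      · intro h
        rw [List.cons_prefix_cons] at h
        exact absurd (by rw [h.1]; exact List.mem_cons_self ..) hk
      · intro h; simp at h
    | cons x xs =>
      have hx' : ':' ∉ xs := fun h => hx (List.mem_cons_of_mem _ h)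
      have hk' : ':' ∉ ks := fun h => hk (List.mem_cons_of_mem _ h)
      simp only [List.cons_append, List.cons_prefix_cons]
      rw [ih hx' hk']
      constructor
      · rintro ⟨h1, h2⟩; rw [h1, h2]
      · intro h
        injection h with h1 h2
        exact ⟨h1.symm, h2⟩

-- A's test on a line iff the partition splits it and the pre-colon part lowers to "fallback"
theorem pvCond_iff (s : String) :
    PySem.Str.startswith (PySem.Str.lower s) "fallback:" = true ↔
      (∃ p q, pvSplitAtColon s.toList = some (p, q) ∧
        PySem.Chars.lower p = "fallback".toList) := by
  have hfb : ("fallback:".toList : List Char) = "fallback".toList ++ [':'] := by decide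
  have hnk : (':' : Char) ∉ "fallback".toList := by decide
  rw [show PySem.Str.startswith (PySem.Str.lower s) "fallback:"
      = PySem.Chars.startswith (PySem.Str.lower s).toList "fallback:".toList by
    simp [PySem.Str.startswith_eq]]
  rw [PySem.Chars.startswith_iff, PySem.Str.toList_lower, hfb]
  constructor
  · intro h
    cases hsp : pvSplitAtColon s.toList with
    | none =>
      exfalso
      have hno : ':' ∉ s.toList := pvSplitAtColon_none hsp
      have : (':' : Char) ∈ PySem.Chars.lower s.toList :=
        h.subset (by simp)
      exact hno ((pvMem_lower_colon s.toList).mp this)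
    | some pq =>
      obtain ⟨p, q⟩ := pq
      obtain ⟨heq, hnp⟩ := pvSplitAtColon_some hsp
      rw [heq, pvLower_append] at h
      have hnp' : ':' ∉ PySem.Chars.lower p := fun hm => hnp ((pvMem_lower_colon p).mp hm)
      exact ⟨p, q, rfl, ((pvPrefix_colon _ hnp' hnk).mp h)⟩
  · rintro ⟨p, q, hsp, hlow⟩
    obtain ⟨heq, hnp⟩ := pvSplitAtColon_some hsp
    rw [heq, pvLower_append]
    have hnp' : ':' ∉ PySem.Chars.lower p := fun hm => hnp ((pvMem_lower_colon p).mp hm)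
    exact (pvPrefix_colon _ hnp' hnk).mpr hlow

-- the lowered pre-colon key equals "fallback" iff its characters lower to "fallback"
theorem pvKey_eq (p : List Char) :
    PySem.Str.lower (String.ofList p) = "fallback" ↔ PySem.Chars.lower p = "fallback".toList := by
  constructor
  · intro h
    have := congrArg String.toList h
    simpa [PySem.Str.toList_lower, String.toList_ofList] using this
  · intro h
    have h' : (PySem.Str.lower (String.ofList p)).toList = ("fallback" : String).toList := by
      simpa [PySem.Str.toList_lower] using h
    exact String.toList_inj.mp h'

-- main loop invariant: B's final lookup equals the first-hit value if one is already
-- in the table, and otherwise equals A's early-exit scan of the remaining lines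
theorem pvLoop_eq (lines : List String) : ∀ (t : PySem.Dict String String),
    (PySem.Str.lower (PySem.Str.strip ((pvLoopB t lines).getD "fallback" "")) == "true")
      = (match t.get? "fallback" with
         | some v => PySem.Str.lower (PySem.Str.strip v) == "true"
         | none => pvLoopA lines) := by
  induction lines with
  | nil =>
    intro t
    simp only [pvLoopB, pvLoopA]
    cases hg : t.get? "fallback" with
    | some v => rw [PySem.Dict.getD_of_get?_eq_some t "" hg]
    | none => rw [PySem.Dict.getD_of_get?_eq_none t "" hg]; decide
  | cons l rest ih =>
    intro t
    simp only [pvLoopB, pvLoopA]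
    by_cases hdash : (PySem.Str.strip l == "---") = true
    · simp only [hdash, if_true]
      cases hg : t.get? "fallback" with
      | some v => rw [PySem.Dict.getD_of_get?_eq_some t "" hg]
      | none => rw [PySem.Dict.getD_of_get?_eq_none t "" hg]; decide
    · simp only [hdash, if_false, Bool.false_eq_true]
      by_cases hcond : PySem.Str.startswith (PySem.Str.lower (PySem.Str.strip l)) "fallback:" = true
      · obtain ⟨p, q, hsp, hlow⟩ := (pvCond_iff _).mp hcond
        have hpart : pvPartitionColon (PySem.Str.strip l) = (String.ofList p, ":", String.ofList q) := by
          unfold pvPartitionColon; rw [hsp]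
        have hkey : PySem.Str.lower (String.ofList p) = "fallback" := (pvKey_eq p).mpr hlow
        simp only [hcond, if_true, hpart, hkey]
        by_cases hc : t.contains "fallback" = true
        · obtain ⟨v, hv⟩ : ∃ v, t.get? "fallback" = some v := by
            have := PySem.Dict.contains_eq_isSome_get? (d := t) (k := "fallback")
            rw [hc] at this
            exact Option.isSome_iff_exists.mp this.symm
          simp only [show (((":" : String) ≠ "") ∧ ¬(t.contains "fallback" = true)) = False by
            simp [hc], if_false]
          rw [ih t, hv]
        · have hget : t.get? "fallback" = none := by
            have := PySem.Dict.contains_eq_isSome_get? (d := t) (k := "fallback")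
            cases hg : t.get? "fallback" with
            | some v => rw [hg] at this; simp at this; exact absurd this hc
            | none => rfl
          simp only [show (((":" : String) ≠ "") ∧ ¬(t.contains "fallback" = true)) = True by
            simp [hc], if_true]
          rw [ih, PySem.Dict.get?_insert_self, hget]
      · simp only [hcond, if_false, Bool.false_eq_true]
        -- the line does not match: B's table keeps the same "fallback" entry
        cases hsp : pvSplitAtColon (PySem.Str.strip l).toList with
        | none =>
          have hpart : pvPartitionColon (PySem.Str.strip l)
              = (PySem.Str.strip l, "", "") := by unfold pvPartitionColon; rw [hsp]
          simp only [hpart]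
          simp only [show ((("" : String) ≠ "") ∧
            ¬(t.contains (PySem.Str.lower (PySem.Str.strip l)) = true)) = False by simp, if_false]
          exact ih t
        | some pq =>
          obtain ⟨p, q⟩ := pq
          have hpart : pvPartitionColon (PySem.Str.strip l)
              = (String.ofList p, ":", String.ofList q) := by unfold pvPartitionColon; rw [hsp]
          have hkey : PySem.Str.lower (String.ofList p) ≠ "fallback" := by
            intro hk
            exact hcond ((pvCond_iff _).mpr ⟨p, q, hsp, (pvKey_eq p).mp hk⟩)
          simp only [hpart]
          by_cases hc : t.contains (PySem.Str.lower (String.ofList p)) = true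
          · simp only [show (((":" : String) ≠ "")
              ∧ ¬(t.contains (PySem.Str.lower (String.ofList p)) = true)) = False by simp [hc],
              if_false]
            exact ih t
          · simp only [show (((":" : String) ≠ "")
              ∧ ¬(t.contains (PySem.Str.lower (String.ofList p)) = true)) = True by simp [hc],
              if_true]
            rw [ih, PySem.Dict.get?_insert_of_ne _ _ (Ne.symm hkey)]

-- ===== VERDICT (by name: the statement is the Claim_ definition above) =====
theorem did_use_fallback_py_spec : Claim_equal_did_use_fallback_py := by
  intro markdown _
  unfold Spec_did_use_fallback_py did_use_fallback_py did_use_fallback_py_alt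
  cases hs : PySem.Str.startswith markdown "---" with
  | false => simp
  | true =>
    simp only [Bool.not_true, if_false, Bool.false_eq_true]
    rw [pvLoop_eq ((PySem.Str.splitlines markdown).drop 1) PySem.Dict.empty,
      PySem.Dict.get?_empty]
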